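-- pv_equiv track=rewrite | github.com/revialim/adventofcode2018 | day2-script.py | getTwiceThree
-- ===== SOURCE A (Python) =====
-- def getTwiceThree(str):
--     charDict = {}
--     for i in range(0, len(str)):
--         charDict[str[i]] = charDict.get(str[i]) + 1 if charDict.get(str[i]) != None else 1
--
--     twice = False
--     three = False
--
--     for k, v in charDict.items():
--         if v == 2:
--             twice = True
--         if v == 3:
--             three = True
--
--     return twice, three
-- ===== SOURCE B (Python) =====
-- def getTwiceThree(str):
--     s = sorted(str)
--     twice = False
--     three = False
--     i = 0
--     n = len(s)
--     while i < n:
--         j = i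
--         while j < n and s[j] == s[i]:
--             j += 1
--         run = j - i
--         if run == 2:
--             twice = True
--         if run == 3:
--             three = True
--         i = j
--     return twice, three
-- ===== Notes on version B (the rewrite author's own statement) =====
-- stated objective: alternative
-- what changed: B sorts the characters and scans consecutive equal runs with two indices, setting the flags from run lengths, instead of A's dict-based counting followed by a pass over the dict items.
import Mathlib
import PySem

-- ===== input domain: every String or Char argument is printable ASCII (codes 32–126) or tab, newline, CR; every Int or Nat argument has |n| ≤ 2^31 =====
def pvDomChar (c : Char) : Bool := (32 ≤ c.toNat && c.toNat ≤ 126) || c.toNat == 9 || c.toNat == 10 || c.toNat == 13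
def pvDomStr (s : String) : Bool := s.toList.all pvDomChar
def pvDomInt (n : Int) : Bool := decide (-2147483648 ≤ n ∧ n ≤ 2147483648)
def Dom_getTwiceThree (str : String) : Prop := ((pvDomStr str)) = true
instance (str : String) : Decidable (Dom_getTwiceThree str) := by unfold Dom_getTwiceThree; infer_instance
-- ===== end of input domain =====

-- B replaces A's dict-counting by sort-then-scan over consecutive equal runs (alternative decomposition, same result).

-- ===== PORT A =====
def getTwiceThree (str : String) : Bool × Bool :=
  let l := str.toList
  let charDict : PySem.Dict Char Int :=
    (PySem.List.pyRange 0 (PySem.List.len l)).foldl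
      (fun d i =>
        let c := PySem.List.pyGetD l i ' '
        match d.get? c with
        | some v => d.insert c (v + 1)
        | none => d.insert c 1)
      PySem.Dict.empty
  charDict.items.foldl
    (fun (p : Bool × Bool) kv =>
      (if kv.2 = 2 then true else p.1, if kv.2 = 3 then true else p.2))
    (false, false)

-- ===== PORT B =====
-- the outer while loop of Source B: measure one run of equal chars, set the flags, continue after the run
def altRunFlags : List Char → Bool → Bool → Bool × Bool
  | [], tw, th => (tw, th)
  | c :: rest, tw, th =>
    let run := 1 + (rest.takeWhile (fun y => y == c)).length
    altRunFlags (rest.dropWhile (fun y => y == c))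
      (if run = 2 then true else tw) (if run = 3 then true else th)
termination_by l => l.length
decreasing_by
  have := List.length_dropWhile_le (fun y => y == c) rest
  simp; omega

def getTwiceThree_alt (str : String) : Bool × Bool :=
  altRunFlags (PySem.List.sorted str.toList id) false false

-- ===== PRECONDITION & SPEC =====
def Spec_getTwiceThree (str : String) (out : Bool × Bool) : Prop := out = getTwiceThree_alt str
instance (str : String) (out : Bool × Bool) : Decidable (Spec_getTwiceThree str out) := by unfold Spec_getTwiceThree; infer_instance

-- ===== CLAIM (what is proved, stated in full; the proofs are below) =====
def Claim_equal_getTwiceThree : Prop := ∀ (str : String), Dom_getTwiceThree str → Spec_getTwiceThree str (getTwiceThree str)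

-- ===== LEMMAS AND PROOFS =====

-- A's second loop only ever sets the flags, so it computes an 'any' over the dict items
theorem flagFold (items : List (Char × Int)) (tw th : Bool) :
    items.foldl (fun (p : Bool × Bool) kv =>
      (if kv.2 = 2 then true else p.1, if kv.2 = 3 then true else p.2)) (tw, th)
    = (tw || items.any (fun kv => kv.2 == 2), th || items.any (fun kv => kv.2 == 3)) := by
  induction items generalizing tw th with
  | nil => simp
  | cons kv rest ih =>
    simp only [List.foldl_cons, List.any_cons, ih]
    have e2 : (kv.2 == (2:Int)) = decide (kv.2 = 2) := by rfl
    have e3 : (kv.2 == (3:Int)) = decide (kv.2 = 3) := by rfl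
    by_cases h2 : kv.2 = 2 <;> by_cases h3 : kv.2 = 3 <;>
      simp [e2, e3, h2, h3]

-- characterisation of A: a flag is set iff some character of the string occurs exactly 2 (resp. 3) times
theorem getTwiceThree_eq_decide (str : String) :
    getTwiceThree str
    = (decide (∃ c ∈ str.toList, str.toList.count c = 2),
       decide (∃ c ∈ str.toList, str.toList.count c = 3)) := by
  show (((PySem.List.pyRange 0 (PySem.List.len str.toList)).foldl
      (fun (d : PySem.Dict Char Int) i =>
        let c := PySem.List.pyGetD str.toList i ' '
        match d.get? c with
        | some v => d.insert c (v + 1)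
        | none => d.insert c 1)
      PySem.Dict.empty).items.foldl
    (fun (p : Bool × Bool) kv =>
      (if kv.2 = 2 then true else p.1, if kv.2 = 3 then true else p.2))
    (false, false)) = _
  have hbody : (fun (d : PySem.Dict Char Int) i =>
        let c := PySem.List.pyGetD str.toList i ' '
        match d.get? c with
        | some v => d.insert c (v + 1)
        | none => d.insert c 1)
      = fun d i => (fun (d : PySem.Dict Char Int) c => d.insert c (d.getD c 0 + 1)) d
          (PySem.List.pyGetD str.toList i ' ') := by
    funext d i
    rcases h : d.get? (PySem.List.pyGetD str.toList i ' ') with _ | v <;>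
      simp [PySem.Dict.getD, h]
  rw [hbody]
  have hm : List.foldl (fun d i => (fun (d : PySem.Dict Char Int) c => d.insert c (d.getD c 0 + 1)) d
        (PySem.List.pyGetD str.toList i ' ')) PySem.Dict.empty
        (PySem.List.pyRange 0 (PySem.List.len str.toList))
      = List.foldl (fun (d : PySem.Dict Char Int) c => d.insert c (d.getD c 0 + 1)) PySem.Dict.empty
        ((PySem.List.pyRange 0 (PySem.List.len str.toList)).map
          (fun i => PySem.List.pyGetD str.toList i ' ')) :=
    (@List.foldl_map Int Char (PySem.Dict Char Int) (fun i => PySem.List.pyGetD str.toList i ' ')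
      (fun d c => d.insert c (d.getD c 0 + 1)) (PySem.List.pyRange 0 (PySem.List.len str.toList))
      PySem.Dict.empty).symm
  rw [hm, PySem.List.map_pyGetD_pyRange_zero,
    PySem.Dict.foldl_insert_getD_add_one_eq_counter, PySem.Dict.items_counter, flagFold]
  have hany : ∀ n : Nat,
      (((PySem.Set.ofList str.toList).map
        (fun k => (k, (str.toList.count k : Int)))).any (fun kv => kv.2 == ((n:Nat) : Int)))
      = decide (∃ c ∈ str.toList, str.toList.count c = n) := by
    intro n
    simp only [List.any_map, Function.comp_def]
    rw [Bool.eq_iff_iff]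
    simp [PySem.Set.mem_ofList]
  have h2 := hany 2
  have h3 := hany 3
  norm_num at h2 h3
  simp [h2, h3]

-- in a sorted list c :: rest, everything left after dropping the leading run of c differs from c
theorem dropWhile_ne (c : Char) :
    ∀ rest : List Char, List.Pairwise (· ≤ ·) (c :: rest) →
      ∀ x ∈ rest.dropWhile (fun y => y == c), x ≠ c := by
  intro rest
  induction rest with
  | nil => simp
  | cons a r ih =>
    intro h x hx
    by_cases hac : a = c
    · subst hac
      have h' : List.Pairwise (· ≤ ·) (a :: r) := (List.pairwise_cons.mp h).2
      simp only [List.dropWhile_cons, BEq.rfl] at hx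
      exact ih h' x hx
    · have hca : c ≤ a := (List.rel_of_pairwise_cons h) (by simp)
      have hlt : c < a := lt_of_le_of_ne hca (fun h' => hac h'.symm)
      simp only [List.dropWhile_cons, beq_iff_eq, hac, if_false] at hx
      have h' : List.Pairwise (· ≤ ·) (a :: r) := (List.pairwise_cons.mp h).2
      have hax : a ≤ x := by
        rcases List.mem_cons.mp hx with rfl | hx'
        · exact le_refl _
        · exact (List.rel_of_pairwise_cons h') hx'
      exact fun hxc => absurd (hxc ▸ hax) (not_le_of_gt hlt)

-- characterisation of B's scan on any sorted list: run lengths are exactly the character counts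
theorem altRunFlags_sorted :
    ∀ (n : Nat) (s : List Char), s.length ≤ n → List.Pairwise (· ≤ ·) s →
      ∀ tw th, altRunFlags s tw th
        = (tw || decide (∃ c ∈ s, s.count c = 2),
           th || decide (∃ c ∈ s, s.count c = 3)) := by
  intro n
  induction n with
  | zero =>
    intro s hs _ tw th
    have : s = [] := List.eq_nil_of_length_eq_zero (Nat.le_zero.mp hs)
    subst this; simp [altRunFlags]
  | succ n ih =>
    intro s hs hsort tw th
    match s with
    | [] => simp [altRunFlags]
    | c :: rest =>
      set t := rest.takeWhile (fun y => y == c) with ht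
      set d := rest.dropWhile (fun y => y == c) with hd
      have hrest : t ++ d = rest := List.takeWhile_append_dropWhile
      have htc : ∀ x ∈ t, x = c := by
        intro x hx
        have := List.mem_takeWhile_imp hx
        simpa using this
      have hdc : ∀ x ∈ d, x ≠ c := dropWhile_ne c rest hsort
      have hdsub : d.Sublist rest := List.dropWhile_sublist _
      have hdsort : List.Pairwise (· ≤ ·) d :=
        ((List.pairwise_cons.mp hsort).2).sublist hdsub
      have hdlen : d.length ≤ n := by
        have h1 := List.length_dropWhile_le (fun y => y == c) rest
        rw [← hd] at h1
        simp only [List.length_cons] at hs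
        omega
      have hcount_t : t.count c = t.length := by
        rw [List.count_eq_length]
        intro x hx; rw [htc x hx]
      have hcount_d : d.count c = 0 := by
        rw [List.count_eq_zero]
        intro hc; exact (hdc c hc) rfl
      have hrun : (c :: rest).count c = 1 + t.length := by
        rw [← hrest]
        simp [List.count_append, hcount_t, hcount_d]
        omega
      have hcount_x : ∀ x, x ≠ c → (c :: rest).count x = d.count x := by
        intro x hxc
        rw [← hrest]
        have h0 : t.count x = 0 := by
          rw [List.count_eq_zero]
          intro hx; exact hxc (htc x hx)
        simp only [List.count_cons, List.count_append, h0]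
        have : ¬c = x := fun h => hxc h.symm
        simp [this]
      have hmem_d : ∀ x ∈ d, x ∈ c :: rest := by
        intro x hx
        exact List.mem_cons_of_mem c (hrest ▸ List.mem_append_right t hx)
      have hequiv : ∀ m : Nat,
          (∃ x ∈ c :: rest, (c :: rest).count x = m)
          ↔ ((c :: rest).count c = m ∨ ∃ x ∈ d, d.count x = m) := by
        intro m
        constructor
        · rintro ⟨x, hx, hcx⟩
          by_cases hxc : x = c
          · left; subst hxc; exact hcx
          · right
            have hx' : x ∈ rest := by
              rcases List.mem_cons.mp hx with h | h
              · exact absurd h hxc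
              · exact h
            rw [← hrest] at hx'
            rcases List.mem_append.mp hx' with hxt | hxd
            · exact absurd (htc x hxt) hxc
            · exact ⟨x, hxd, by rw [← hcount_x x hxc]; exact hcx⟩
        · rintro (hm | ⟨x, hx, hm⟩)
          · exact ⟨c, List.mem_cons_self, hm⟩
          · exact ⟨x, hmem_d x hx, by rw [hcount_x x (hdc x hx)]; exact hm⟩
      rw [altRunFlags]
      rw [ih d hdlen hdsort]
      have e2 : decide (∃ x ∈ c :: rest, (c :: rest).count x = 2)
          = (decide (1 + t.length = 2) || decide (∃ x ∈ d, d.count x = 2)) := by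
        rw [Bool.eq_iff_iff]
        simp only [Bool.or_eq_true, decide_eq_true_eq]
        rw [hequiv 2, hrun]
      have e3 : decide (∃ x ∈ c :: rest, (c :: rest).count x = 3)
          = (decide (1 + t.length = 3) || decide (∃ x ∈ d, d.count x = 3)) := by
        rw [Bool.eq_iff_iff]
        simp only [Bool.or_eq_true, decide_eq_true_eq]
        rw [hequiv 3, hrun]
      rw [e2, e3]
      simp only [← ht, ← hd]
      by_cases h2 : 1 + t.length = 2 <;> by_cases h3 : 1 + t.length = 3
      · exact absurd h3 (by omega)
      · simp [h2, h3, Bool.or_comm]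
      · simp [h2, h3, Bool.or_comm]
      · simp [h2, h3, Bool.or_comm]

-- characterisation of B: same decide form as A, via the sort's permutation
theorem getTwiceThree_alt_eq_decide (str : String) :
    getTwiceThree_alt str
    = (decide (∃ c ∈ str.toList, str.toList.count c = 2),
       decide (∃ c ∈ str.toList, str.toList.count c = 3)) := by
  unfold getTwiceThree_alt
  set s := PySem.List.sorted str.toList id with hs
  have hsort : List.Pairwise (· ≤ ·) s := by
    have := PySem.List.sorted_pairwise str.toList id
    simpa using this
  have hperm : s.Perm str.toList := PySem.List.sorted_perm str.toList id false
  rw [altRunFlags_sorted s.length s (le_refl _) hsort]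
  have hiff : ∀ m : Nat, (∃ c ∈ s, s.count c = m) ↔ (∃ c ∈ str.toList, str.toList.count c = m) := by
    intro m
    constructor <;> rintro ⟨c, hc, hm⟩
    · exact ⟨c, hperm.mem_iff.mp hc, by rw [← hm]; exact (hperm.count_eq c).symm⟩
    · exact ⟨c, hperm.mem_iff.mpr hc, by rw [← hm]; exact hperm.count_eq c⟩
  simp only [Bool.false_or, Prod.mk.injEq]
  exact ⟨decide_eq_decide.mpr (hiff 2), decide_eq_decide.mpr (hiff 3)⟩

-- ===== VERDICT (by name: the statement is the Claim_ definition above) =====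
theorem getTwiceThree_spec : Claim_equal_getTwiceThree := by
  intro str _
  unfold Spec_getTwiceThree
  rw [getTwiceThree_eq_decide, getTwiceThree_alt_eq_decide]
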